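-- pv_equiv track=rewrite | github.com/Murali121290/cms_backend | app/processing/legacy/extractor.py | get_chapter_at
-- ===== SOURCE A (Python) =====
-- def get_chapter_at(index: int, chapter_map: dict) -> str:
--     """Return the chapter active at `index`."""
--     if index in chapter_map:
--         return chapter_map[index]
--     chapter = ""
--     for k in sorted(chapter_map.keys()):
--         if k <= index:
--             chapter = chapter_map[k]
--         else:
--             break
--     return chapter
-- ===== SOURCE B (Python) =====
-- def get_chapter_at(index: int, chapter_map: dict) -> str:
--     """Return the chapter active at `index`: binary-search the sorted keys
--     for the largest key <= index (bisect_right, hand-rolled)."""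
--     keys = sorted(chapter_map)
--     lo, hi = 0, len(keys)
--     while lo < hi:
--         mid = (lo + hi) // 2
--         if keys[mid] <= index:
--             lo = mid + 1
--         else:
--             hi = mid
--     if lo == 0:
--         return ""
--     return chapter_map[keys[lo - 1]]
-- ===== Notes on version B (the rewrite author's own statement) =====
-- stated objective: alternative
-- what changed: A's linear scan over the sorted keys with a break (plus a dict-membership fast path) is replaced by a bisect_right-style binary search over the sorted keys for the insertion point of index, returning the value at the floor key; the per-element scan and the fast path disappear.
import Mathlib
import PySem

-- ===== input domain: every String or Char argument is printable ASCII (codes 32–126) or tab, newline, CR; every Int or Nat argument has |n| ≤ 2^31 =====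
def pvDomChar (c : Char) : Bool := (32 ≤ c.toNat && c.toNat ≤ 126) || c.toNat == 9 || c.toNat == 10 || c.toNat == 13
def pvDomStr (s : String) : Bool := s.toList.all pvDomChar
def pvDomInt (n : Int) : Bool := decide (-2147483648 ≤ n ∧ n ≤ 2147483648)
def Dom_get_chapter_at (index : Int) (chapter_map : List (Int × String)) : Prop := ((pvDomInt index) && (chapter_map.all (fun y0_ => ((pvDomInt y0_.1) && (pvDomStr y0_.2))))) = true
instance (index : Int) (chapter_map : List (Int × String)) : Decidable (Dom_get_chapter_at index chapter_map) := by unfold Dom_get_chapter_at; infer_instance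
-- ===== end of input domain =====

-- B replaces A's linear scan-with-break over the sorted keys by a bisect_right-style
-- binary search for the floor key (alternative algorithm; the sort still dominates).

-- ===== PORT A =====
-- the for-loop with `break`: chapter_map[k] is looked up only at keys of the dict, so getD "" is exact there
def chapLoop (d : PySem.Dict Int String) (index : Int) : List Int → String → String
  | [], chapter => chapter
  | k :: rest, chapter =>
      if k ≤ index then chapLoop d index rest (d.getD k "") else chapter

def get_chapter_at (index : Int) (chapter_map : List (Int × String)) : String :=
  let d := PySem.Dict.ofList chapter_map
  -- chapter_map[index] is guarded by `index in chapter_map`, so getD "" is exact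
  if d.contains index then d.getD index ""
  else chapLoop d index (PySem.List.sorted d.keys (fun x => x)) ""

-- ===== PORT B =====
-- the while-loop of Source B; keys[mid] has lo ≤ mid < hi ≤ len(keys), so getD 0 is exact there
def bsearch (keys : List Int) (index : Int) (lo hi : Nat) : Nat :=
  if h : lo < hi then
    let mid := (lo + hi) / 2
    if keys.getD mid 0 ≤ index then bsearch keys index (mid + 1) hi
    else bsearch keys index lo mid
  else lo
termination_by hi - lo
decreasing_by all_goals omega

def get_chapter_at_alt (index : Int) (chapter_map : List (Int × String)) : String :=
  let d := PySem.Dict.ofList chapter_map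
  let keys := PySem.List.sorted d.keys (fun x => x)
  let lo := bsearch keys index 0 keys.length
  -- chapter_map[keys[lo-1]] is looked up only at a key of the dict, so getD is exact
  if lo = 0 then "" else d.getD (keys.getD (lo - 1) 0) ""

-- ===== PRECONDITION & SPEC =====
def Spec_get_chapter_at (index : Int) (chapter_map : List (Int × String)) (out : String) : Prop := out = get_chapter_at_alt index chapter_map
instance (index : Int) (chapter_map : List (Int × String)) (out : String) : Decidable (Spec_get_chapter_at index chapter_map out) := by unfold Spec_get_chapter_at; infer_instance

-- ===== CLAIM (what is proved, stated in full; the proofs are below) =====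
def Claim_equal_get_chapter_at : Prop := ∀ (index : Int) (chapter_map : List (Int × String)), Dom_get_chapter_at index chapter_map → Spec_get_chapter_at index chapter_map (get_chapter_at index chapter_map)

-- ===== LEMMAS AND PROOFS =====

lemma pairwise_getElem_mono (ks : List Int) (hp : List.Pairwise (fun a b => a ≤ b) ks)
    {i j : Nat} (hij : i ≤ j) (hj : j < ks.length) : ks[i]'(by omega) ≤ ks[j] := by
  rcases Nat.lt_or_ge i j with h | h
  · exact List.pairwise_iff_getElem.mp hp i j (by omega) hj h
  · have : i = j := by omega
    subst this; exact le_refl _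

-- the binary search of Source B computes the bisect_right insertion point
lemma bsearch_spec (ks : List Int) (x : Int)
    (hp : List.Pairwise (fun a b => a ≤ b) ks) :
    ∀ (n lo hi : Nat), hi - lo ≤ n → hi ≤ ks.length → lo ≤ hi →
    (∀ j (_ : j < lo) (hj : j < ks.length), ks[j] ≤ x) →
    (∀ j (_ : hi ≤ j) (hj : j < ks.length), x < ks[j]) →
    bsearch ks x lo hi ≤ ks.length ∧
    (∀ j (hj : j < ks.length), j < bsearch ks x lo hi → ks[j] ≤ x) ∧
    (∀ j (hj : j < ks.length), bsearch ks x lo hi ≤ j → x < ks[j]) := by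
  intro n
  induction n with
  | zero =>
    intro lo hi hn hhi hlohi hLo hHi
    have hEq : lo = hi := by omega
    rw [bsearch]
    simp only [show ¬ lo < hi by omega, dite_false]
    exact ⟨by omega, fun j hj hjlo => hLo j hjlo hj, fun j hj hjlo => hHi j (by omega) hj⟩
  | succ n ih =>
    intro lo hi hn hhi hlohi hLo hHi
    rw [bsearch]
    by_cases h : lo < hi
    · simp only [h, dite_true]
      have hmid1 : lo ≤ (lo + hi) / 2 := by omega
      have hmid2 : (lo + hi) / 2 < hi := by omega
      have hmlen : (lo + hi) / 2 < ks.length := by omega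
      have hget : ks.getD ((lo + hi) / 2) 0 = ks[(lo + hi) / 2] := List.getD_eq_getElem ks 0 hmlen
      by_cases hc : ks.getD ((lo + hi) / 2) 0 ≤ x
      · simp only [hc, if_true]
        refine ih ((lo + hi) / 2 + 1) hi (by omega) hhi (by omega) ?_ hHi
        intro j hjlo hj
        rcases Nat.lt_or_ge j lo with hl | hl
        · exact hLo j hl hj
        · calc ks[j] ≤ ks[(lo + hi) / 2] := pairwise_getElem_mono ks hp (by omega) hmlen
            _ ≤ x := by rwa [hget] at hc
      · simp only [hc]
        refine ih lo ((lo + hi) / 2) (by omega) (by omega) (by omega) hLo ?_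
        intro j hjlo hj
        have hx : x < ks[(lo + hi) / 2] := by rw [hget] at hc; omega
        calc x < ks[(lo + hi) / 2] := hx
          _ ≤ ks[j] := pairwise_getElem_mono ks hp hjlo hj
    · simp only [h, dite_false]
      have hEq : lo = hi := by omega
      exact ⟨by omega, fun j hj hjlo => hLo j (by omega) hj, fun j hj hjlo => hHi j (by omega) hj⟩

-- A's scan-with-break returns the value at position pos-1 when pos elements are ≤ index
lemma chapLoop_eq (d : PySem.Dict Int String) (index : Int) :
    ∀ (ks : List Int) (pos : Nat), pos ≤ ks.length →
    (∀ j (hj : j < ks.length), j < pos → ks[j] ≤ index) →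
    (∀ j (hj : j < ks.length), pos ≤ j → index < ks[j]) →
    ∀ ch, chapLoop d index ks ch = if pos = 0 then ch else d.getD (ks.getD (pos - 1) 0) "" := by
  intro ks
  induction ks with
  | nil =>
    intro pos hle _ _ ch
    have : pos = 0 := by simpa using hle
    simp [chapLoop, this]
  | cons k rest ih =>
    intro pos hle h1 h2 ch
    match pos with
    | 0 =>
      have hk : index < k := h2 0 (by simp) (by omega)
      simp [chapLoop, show ¬ k ≤ index by omega]
    | p + 1 =>
      have hk : k ≤ index := h1 0 (by simp) (by omega)
      have hrest := ih p (by simpa using hle)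
        (fun j hj hjp => by
          have := h1 (j + 1) (by simpa using hj) (by omega)
          simpa using this)
        (fun j hj hjp => by
          have := h2 (j + 1) (by simpa using hj) (by omega)
          simpa using this)
      simp only [chapLoop, hk, if_true]
      rw [hrest (d.getD k "")]
      match p with
      | 0 => simp
      | q + 1 => simp

-- ===== VERDICT (by name: the statement is the Claim_ definition above) =====
theorem get_chapter_at_spec : Claim_equal_get_chapter_at := by
  intro index chapter_map _
  unfold Spec_get_chapter_at get_chapter_at get_chapter_at_alt
  set d := PySem.Dict.ofList chapter_map with hd
  set ks := PySem.List.sorted d.keys (fun x => x) with hks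
  have hp : List.Pairwise (fun a b => a ≤ b) ks := PySem.List.sorted_pairwise d.keys (fun x => x)
  obtain ⟨hle, h1, h2⟩ := bsearch_spec ks index hp ks.length 0 ks.length (by omega) (le_refl _)
    (by omega) (fun j hj _ => by omega) (fun j hj hjl => by omega)
  set pos := bsearch ks index 0 ks.length with hpos
  by_cases hc : d.contains index
  · simp only [hc, if_true]
    have hmem : index ∈ ks := by
      rw [hks, PySem.List.mem_sorted]
      exact (PySem.Dict.contains_iff_mem_keys d index).mp hc
    obtain ⟨i, hi, hik⟩ := List.mem_iff_getElem.mp hmem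
    have hipos : i < pos := by
      by_contra hcon
      have := h2 i hi (by omega)
      omega
    have hpos1 : pos - 1 < ks.length := by omega
    have hkey : ks[pos - 1] = index := by
      have hub : ks[pos - 1] ≤ index := h1 (pos - 1) hpos1 (by omega)
      have hlb : index ≤ ks[pos - 1] := by
        calc index = ks[i] := hik.symm
          _ ≤ ks[pos - 1] := pairwise_getElem_mono ks hp (by omega) hpos1
      omega
    rw [if_neg (by omega : ¬ pos = 0), List.getD_eq_getElem ks 0 hpos1, hkey]
  · simp only [hc]
    exact chapLoop_eq d index ks pos hle h1 h2 ""
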